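-- pv_equiv track=rewrite | github.com/lymanstudio/proj_namu_qa_rag | FaissMetaVectorStore.py | concat_selected_fields_in_metadatas
-- ===== SOURCE A (Python) =====
-- from typing import (
--     Any,
--     Callable,
--     Dict,
--     Iterable,
--     List,
--     Optional,
--     Union,
--     TypeVar,
--     Type
-- )
--
-- def concat_selected_fields_in_metadatas(
--         metadatas: List[dict] = None,
--         selected_fields: List[str] = None,
--         separator: Optional[str] = ", "
--     ) -> List[str]:
--
--     common_keys = set(metadatas[0].keys())
--     for metadata in metadatas[1:]:
--         common_keys.intersection_update(metadata.keys())
--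
--     if all(field in common_keys for field in selected_fields) == False:
--         raise KeyError(
--             f"One or more keys in the metadata_fields is not in the metadata dictionaries"
--         )
--
--     return [separator.join([str(metadata.get(field)) for field in selected_fields]) for metadata in metadatas]
-- ===== SOURCE B (Python) =====
-- from typing import List, Optional
--
-- def concat_selected_fields_in_metadatas(
--         metadatas: List[dict] = None,
--         selected_fields: List[str] = None,
--         separator: Optional[str] = ", "
--     ) -> List[str]:
--
--     n = len(metadatas)
--     counts = {}
--     for metadata in metadatas:
--         for k in metadata:
--             counts[k] = counts.get(k, 0) + 1
--
--     if any(counts.get(field, 0) != n for field in selected_fields):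
--         raise KeyError(
--             f"One or more keys in the metadata_fields is not in the metadata dictionaries"
--         )
--
--     result = []
--     for metadata in metadatas:
--         row = None
--         for field in selected_fields:
--             v = str(metadata.get(field))
--             row = v if row is None else row + separator + v
--         result.append(row if row is not None else "")
--     return result
-- ===== Notes on version B (the rewrite author's own statement) =====
-- stated objective: alternative
-- what changed: Validation is done with a key-occurrence counter (each field must be counted exactly len(metadatas) times) instead of maintaining an intersection set, and each output row is built by a single accumulator loop interleaving the separator instead of separator.join over a mapped list.
import Mathlib
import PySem

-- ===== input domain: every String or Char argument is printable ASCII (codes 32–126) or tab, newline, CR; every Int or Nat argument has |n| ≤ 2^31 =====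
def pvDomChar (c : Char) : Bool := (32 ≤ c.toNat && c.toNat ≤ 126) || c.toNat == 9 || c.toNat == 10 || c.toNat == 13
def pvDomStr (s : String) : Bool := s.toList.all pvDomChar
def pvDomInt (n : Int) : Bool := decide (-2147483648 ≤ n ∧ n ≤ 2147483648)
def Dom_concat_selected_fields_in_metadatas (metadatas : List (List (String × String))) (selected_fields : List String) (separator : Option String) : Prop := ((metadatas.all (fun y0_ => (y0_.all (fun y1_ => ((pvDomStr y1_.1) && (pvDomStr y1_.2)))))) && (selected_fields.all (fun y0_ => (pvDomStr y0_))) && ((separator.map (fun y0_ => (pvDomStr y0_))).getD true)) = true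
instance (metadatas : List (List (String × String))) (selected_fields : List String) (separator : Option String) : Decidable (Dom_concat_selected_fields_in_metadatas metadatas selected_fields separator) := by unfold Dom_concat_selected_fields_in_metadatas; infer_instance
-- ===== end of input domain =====

-- B validates fields with a key-occurrence counter (count == len(metadatas)) instead of an
-- intersection set, and builds each row with an accumulator loop instead of separator.join
-- (objective: alternative; identical output wherever A returns).

-- ===== PORT A =====
-- str(metadata.get(field)) : None prints as "None"
def pvStrOfGet (o : Option String) : String :=
  match o with
  | some v => v
  | none => "None"

def concat_selected_fields_in_metadatas (metadatas : List (List (String × String))) (selected_fields : List String) (separator : Option String) : List String :=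
  match metadatas with
  | [] => []  -- metadatas[0] raises IndexError (excluded by Pre_)
  | m0 :: rest =>
    -- common_keys = set(metadatas[0].keys()); then intersection_update with each further dict
    let common := rest.foldl (fun s m => PySem.Set.inter s (PySem.Dict.ofList m).keys)
                    (PySem.Set.ofList (PySem.Dict.ofList m0).keys)
    if selected_fields.all (fun f => PySem.Set.contains common f) then
      match separator with
      | some sep =>
        (m0 :: rest).map (fun m =>
          PySem.Str.join sep (selected_fields.map (fun f => pvStrOfGet ((PySem.Dict.ofList m).get? f))))
      | none => []  -- separator is None: None.join raises (excluded by Pre_)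
    else []  -- raise KeyError (excluded by Pre_)

-- ===== PORT B =====
-- row = None; for field: v = str(m.get(field)); row = v if row is None else row + separator + v
-- (string concatenation done on List Char so the kernel can evaluate it)
def pvRowB (sep : String) (fields : List String) (m : List (String × String)) : String :=
  String.ofList
    ((fields.foldl (fun (row : Option (List Char)) f =>
        let v := (pvStrOfGet ((PySem.Dict.ofList m).get? f)).toList
        some (match row with
              | none => v
              | some parts => parts ++ sep.toList ++ v)) none).getD [])

def concat_selected_fields_in_metadatas_alt (metadatas : List (List (String × String))) (selected_fields : List String) (separator : Option String) : List String :=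
  -- counts[k] = counts.get(k, 0) + 1 over every key of every metadata dict
  let n : Int := (metadatas.length : Int)
  let counts : PySem.Dict String Int :=
    metadatas.foldl (fun d m =>
      (PySem.Dict.ofList m).keys.foldl (fun d k => d.insert k (d.getD k 0 + 1)) d)
      PySem.Dict.empty
  if selected_fields.any (fun f => decide (counts.getD f 0 ≠ n)) then
    []  -- raise KeyError (excluded by Pre_)
  else
    match separator with
    | none =>
      -- 'row + separator + v' raises only when a second field is appended; with ≤ 1 fields the
      -- loop never touches the separator (these None inputs are excluded by Pre_ anyway)
      if selected_fields.length ≤ 1 then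
        metadatas.foldl (fun acc m => acc ++ [pvRowB "" selected_fields m]) []
      else []  -- TypeError (excluded by Pre_)
    | some sep =>
      metadatas.foldl (fun acc m => acc ++ [pvRowB sep selected_fields m]) []

-- ===== PRECONDITION & SPEC =====
-- Pre_ excludes exactly the inputs where A raises: empty metadatas (IndexError), separator None
-- (join on None raises), or a selected field missing from some metadata dict (KeyError).
def Pre_concat_selected_fields_in_metadatas (metadatas : List (List (String × String))) (selected_fields : List String) (separator : Option String) : Prop :=
  metadatas ≠ [] ∧ separator ≠ none ∧
  ∀ f ∈ selected_fields, ∀ m ∈ metadatas, (PySem.Dict.ofList m).contains f = true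

instance (metadatas : List (List (String × String))) (selected_fields : List String) (separator : Option String) : Decidable (Pre_concat_selected_fields_in_metadatas metadatas selected_fields separator) := by unfold Pre_concat_selected_fields_in_metadatas; infer_instance

def pvWitness_concat_selected_fields_in_metadatas : (List (List (String × String))) × List String × Option String :=
  ([[("a", "1"), ("b", "x")], [("a", "2"), ("b", "y")]], ["a", "b"], some ", ")

def Spec_concat_selected_fields_in_metadatas (metadatas : List (List (String × String))) (selected_fields : List String) (separator : Option String) (out : List String) : Prop := out = concat_selected_fields_in_metadatas_alt metadatas selected_fields separator
instance (metadatas : List (List (String × String))) (selected_fields : List String) (separator : Option String) (out : List String) : Decidable (Spec_concat_selected_fields_in_metadatas metadatas selected_fields separator out) := by unfold Spec_concat_selected_fields_in_metadatas; infer_instance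

-- ===== CLAIM =====
def Claim_equal_concat_selected_fields_in_metadatas : Prop := ∀ (metadatas : List (List (String × String))) (selected_fields : List String) (separator : Option String), Dom_concat_selected_fields_in_metadatas metadatas selected_fields separator → Pre_concat_selected_fields_in_metadatas metadatas selected_fields separator → Spec_concat_selected_fields_in_metadatas metadatas selected_fields separator (concat_selected_fields_in_metadatas metadatas selected_fields separator)

-- ===== LEMMAS AND PROOFS =====

-- membership in A's fold of intersections
theorem pv_mem_foldl_inter (rest : List (List (String × String))) (s : PySem.Set String) (x : String) :
    x ∈ rest.foldl (fun s m => PySem.Set.inter s (PySem.Dict.ofList m).keys) s ↔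
      x ∈ s ∧ ∀ m ∈ rest, x ∈ (PySem.Dict.ofList m).keys := by
  induction rest generalizing s with
  | nil => simp
  | cons m ms ih =>
    rw [List.foldl_cons, ih, PySem.Set.mem_inter, List.forall_mem_cons]
    tauto

-- B's counter: the count of f is the sum over the dicts of f's key-count there
theorem pv_getD_counts (metadatas : List (List (String × String))) (d : PySem.Dict String Int) (f : String) :
    (metadatas.foldl (fun d m =>
        (PySem.Dict.ofList m).keys.foldl (fun d k => d.insert k (d.getD k 0 + 1)) d) d).getD f 0
      = d.getD f 0 + (metadatas.map (fun m => ((PySem.Dict.ofList m).keys.count f : Int))).sum := by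
  induction metadatas generalizing d with
  | nil => simp
  | cons m ms ih =>
    rw [List.foldl_cons, ih, PySem.Dict.getD_foldl_insert_add_one]
    simp [add_assoc]

-- B's accumulator row equals Chars.join
theorem pv_row_fold (sep : List Char) (vfun : String → List Char) (fields : List String) (s : List Char) :
    fields.foldl (fun (row : Option (List Char)) f =>
        some (match row with | none => vfun f | some parts => parts ++ sep ++ vfun f)) (some s)
      = some (PySem.Chars.join sep (s :: fields.map vfun)) := by
  induction fields generalizing s with
  | nil => simp [PySem.Chars.join_singleton]
  | cons f fs ih =>
    rw [List.foldl_cons, ih, List.map_cons, PySem.Chars.join_cons_cons]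
    cases h : fs.map vfun with
    | nil => simp [PySem.Chars.join_singleton]
    | cons w ws =>
      rw [PySem.Chars.join_cons_cons, PySem.Chars.join_cons_cons]
      simp [List.append_assoc]

theorem pv_row_eq_join (sep : String) (fields : List String) (m : List (String × String)) :
    pvRowB sep fields m
      = PySem.Str.join sep (fields.map (fun f => pvStrOfGet ((PySem.Dict.ofList m).get? f))) := by
  unfold pvRowB
  apply String.toList_injective
  rw [PySem.Str.toList_join, String.toList_ofList, List.map_map]
  cases fields with
  | nil => simp [PySem.Chars.join_nil]
  | cons f fs =>
    rw [List.foldl_cons]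
    have := pv_row_fold sep.toList (fun f => (pvStrOfGet ((PySem.Dict.ofList m).get? f)).toList)
      fs ((pvStrOfGet ((PySem.Dict.ofList m).get? f)).toList)
    simp only [this, Option.getD_some, List.map_cons, List.map_map, Function.comp_def]

theorem concat_spec_aux (metadatas : List (List (String × String))) (selected_fields : List String) (separator : Option String)
    (hpre : Pre_concat_selected_fields_in_metadatas metadatas selected_fields separator) :
    concat_selected_fields_in_metadatas metadatas selected_fields separator =
      concat_selected_fields_in_metadatas_alt metadatas selected_fields separator := by
  obtain ⟨hne, hsep, hall⟩ := hpre
  have hmem : ∀ f ∈ selected_fields, ∀ m ∈ metadatas, f ∈ (PySem.Dict.ofList m).keys := by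
    intro f hf m hm
    exact (PySem.Dict.contains_iff_mem_keys _ _).1 (hall f hf m hm)
  -- B's guard is false: every selected field is counted once per dict
  have hB : (selected_fields.any (fun f =>
      decide ((metadatas.foldl (fun d m =>
          (PySem.Dict.ofList m).keys.foldl (fun d k => d.insert k (d.getD k 0 + 1)) d)
          PySem.Dict.empty).getD f 0 ≠ (metadatas.length : Int)))) = false := by
    rw [List.any_eq_false]
    intro f hf
    have hcnt : ∀ m ∈ metadatas, ((PySem.Dict.ofList m).keys.count f : Int) = 1 := by
      intro m hm
      have := List.count_eq_one_of_mem (PySem.Dict.nodup_keys_ofList m) (hmem f hf m hm)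
      exact_mod_cast this
    rw [pv_getD_counts, PySem.Dict.getD_empty, List.map_congr_left hcnt]
    simp
  cases metadatas with
  | nil => exact absurd rfl hne
  | cons m0 rest =>
    cases separator with
    | none => exact absurd rfl hsep
    | some sep =>
      -- A's guard is true
      have hA : (selected_fields.all (fun f => PySem.Set.contains
          (rest.foldl (fun s m => PySem.Set.inter s (PySem.Dict.ofList m).keys)
            (PySem.Set.ofList (PySem.Dict.ofList m0).keys)) f)) = true := by
        rw [List.all_eq_true]
        intro f hf
        rw [PySem.Set.contains_iff, pv_mem_foldl_inter, PySem.Set.mem_ofList]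
        exact ⟨hmem f hf m0 (by simp), fun m hm => hmem f hf m (by simp [hm])⟩
      simp only [concat_selected_fields_in_metadatas, concat_selected_fields_in_metadatas_alt, hA, hB]
      simp only [if_true, Bool.false_eq_true, if_false, PySem.List.foldl_append_singleton_eq_map, List.nil_append]
      exact List.map_congr_left (fun m _ => (pv_row_eq_join sep selected_fields m).symm)

-- ===== VERDICT =====
theorem concat_selected_fields_in_metadatas_spec : Claim_equal_concat_selected_fields_in_metadatas := by
  intro metadatas selected_fields separator _ hpre
  exact concat_spec_aux metadatas selected_fields separator hpre
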